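-- pv_equiv track=rewrite | github.com/nico-fernandez/parser-py | Terminals/ELSE.py | ELSE_automata
-- ===== SOURCE A (Python) =====
-- TRAP_STATE = -1
--
-- RESULT_TRAP = "RESULT_TRAP"
--
-- RESULT_ACCEPTED = "ACCEPTED"
--
-- RESULT_NOT_ACCEPTED = "NOT ACCEPTED"
--
-- def ELSE_delta(state, character):
--     if state == 0 and character == "e":
--         return 1
--     if state == 1 and character == "l":
--         return 2
--     if state == 2 and character == "s":
--         return 3
--     if state == 3 and character == "e":
--         return 4
--     return TRAP_STATE
--
-- def ELSE_automata(string):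
--     finals = [4]
--     state = 0
--
--     for character in string:
--         next_state = ELSE_delta(state, character)
--         state = next_state
--
--     if state in finals:
--         return RESULT_ACCEPTED
--     if state == TRAP_STATE:
--         return RESULT_TRAP
--     return RESULT_NOT_ACCEPTED
-- ===== SOURCE B (Python) =====
-- TRAP_STATE = -1
-- RESULT_TRAP = "RESULT_TRAP"
-- RESULT_ACCEPTED = "ACCEPTED"
-- RESULT_NOT_ACCEPTED = "NOT ACCEPTED"
--
-- def ELSE_automata(string):
--     chars = list(string)
--     target = ['e', 'l', 's', 'e']
--     if chars == target:
--         return RESULT_ACCEPTED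
--     if len(chars) < 4 and chars == target[:len(chars)]:
--         return RESULT_NOT_ACCEPTED
--     return RESULT_TRAP
-- ===== Notes on version B (the rewrite author's own statement) =====
-- stated objective: simpler
-- what changed: Replaces the char-by-char DFA transition simulation with a direct comparison of the input against the literal target word and its proper prefixes.
import Mathlib
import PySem

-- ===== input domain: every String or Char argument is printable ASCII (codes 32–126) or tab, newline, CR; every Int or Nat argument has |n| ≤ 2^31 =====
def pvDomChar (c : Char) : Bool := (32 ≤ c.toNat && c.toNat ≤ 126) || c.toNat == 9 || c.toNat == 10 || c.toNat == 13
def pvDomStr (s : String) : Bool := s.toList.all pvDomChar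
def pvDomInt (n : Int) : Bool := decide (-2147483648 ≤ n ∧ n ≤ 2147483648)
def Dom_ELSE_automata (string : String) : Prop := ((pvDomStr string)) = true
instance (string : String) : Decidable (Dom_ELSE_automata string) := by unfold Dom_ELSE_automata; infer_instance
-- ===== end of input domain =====

-- B replaces the DFA transition simulation with a direct comparison against "else" and its proper prefixes (simpler).

-- ===== PORT A =====
def ELSE_delta (state : Int) (character : Char) : Int :=
  if state = 0 ∧ character = 'e' then 1
  else if state = 1 ∧ character = 'l' then 2
  else if state = 2 ∧ character = 's' then 3
  else if state = 3 ∧ character = 'e' then 4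
  else -1

def ELSE_automata (string : String) : String :=
  let finals : List Int := [4]
  let state := string.toList.foldl (fun st ch => ELSE_delta st ch) 0
  if state ∈ finals then "ACCEPTED"
  else if state = -1 then "RESULT_TRAP"
  else "NOT ACCEPTED"

-- ===== PORT B =====
def ELSE_automata_alt (string : String) : String :=
  let chars := string.toList
  let target : List Char := ['e', 'l', 's', 'e']
  if chars = target then "ACCEPTED"
  else if chars.length < 4 ∧ chars = target.take chars.length then "NOT ACCEPTED"
  else "RESULT_TRAP"

-- ===== PRECONDITION & SPEC =====
def Spec_ELSE_automata (string : String) (out : String) : Prop := out = ELSE_automata_alt string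
instance (string : String) (out : String) : Decidable (Spec_ELSE_automata string out) := by unfold Spec_ELSE_automata; infer_instance

-- ===== CLAIM (what is proved, stated in full; the proofs are below) =====
def Claim_equal_ELSE_automata : Prop := ∀ (string : String), Dom_ELSE_automata string → Spec_ELSE_automata string (ELSE_automata string)

-- ===== LEMMAS AND PROOFS =====

theorem ELSE_fold_trap (cs : List Char) :
    cs.foldl (fun st ch =>
      if st = 0 ∧ ch = 'e' then 1
      else if st = 1 ∧ ch = 'l' then 2
      else if st = 2 ∧ ch = 's' then 3
      else if st = 3 ∧ ch = 'e' then 4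
      else -1) (-1 : Int) = -1 := by
  induction cs with
  | nil => rfl
  | cons c t ih => simpa using ih

theorem ELSE_bodies_eq (cs : List Char) :
    (let finals : List Int := [4]
     let state := cs.foldl (fun st ch => ELSE_delta st ch) 0
     if state ∈ finals then "ACCEPTED"
     else if state = -1 then "RESULT_TRAP"
     else "NOT ACCEPTED")
    =
    (let target : List Char := ['e', 'l', 's', 'e']
     if cs = target then "ACCEPTED"
     else if cs.length < 4 ∧ cs = target.take cs.length then "NOT ACCEPTED"
     else "RESULT_TRAP") := by
  rcases cs with _ | ⟨c1, _ | ⟨c2, _ | ⟨c3, _ | ⟨c4, rest⟩⟩⟩⟩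
  · simp
  · by_cases h1 : c1 = 'e' <;> simp [ELSE_delta, h1, ELSE_fold_trap]
  · by_cases h1 : c1 = 'e' <;> by_cases h2 : c2 = 'l' <;>
      simp [ELSE_delta, h1, h2, ELSE_fold_trap]
  · by_cases h1 : c1 = 'e' <;> by_cases h2 : c2 = 'l' <;> by_cases h3 : c3 = 's' <;>
      simp [ELSE_delta, h1, h2, h3, ELSE_fold_trap]
  · rcases rest with _ | ⟨c5, rest'⟩
    · by_cases h1 : c1 = 'e' <;> by_cases h2 : c2 = 'l' <;> by_cases h3 : c3 = 's' <;>
        by_cases h4 : c4 = 'e' <;>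
        simp [ELSE_delta, h1, h2, h3, h4, ELSE_fold_trap]
    · by_cases h1 : c1 = 'e' <;> by_cases h2 : c2 = 'l' <;> by_cases h3 : c3 = 's' <;>
        by_cases h4 : c4 = 'e' <;>
        simp [ELSE_delta, h1, h2, h3, h4, ELSE_fold_trap]

-- ===== VERDICT (by name: the statement is the Claim_ definition above) =====
theorem ELSE_automata_spec : Claim_equal_ELSE_automata := by
  intro string _
  unfold Spec_ELSE_automata ELSE_automata ELSE_automata_alt
  exact ELSE_bodies_eq string.toList
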